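-- pv_equiv track=rewrite | github.com/galborsz/minphonfeat_extension | featureminext.py | find_smallest_sublist_length
-- ===== SOURCE A (Python) =====
-- def find_smallest_sublist_length(lst):
--     min_lengths = {}
--
--     for sublist in lst:
--         sublist = sublist.strip("[]").split(',')
--         # Iterate through each unique value
--         for value in sublist:
--             value = value.strip('+')
--             value = value.strip('-')
--             # Check if the value already exists in the dictionary
--             if value in min_lengths:
--                 # If the length of the current sublist is smaller than the stored length,
--                 # update the stored length
--                 min_lengths[value] = min(min_lengths[value], len(sublist))
--             else:
--                 # If the value doesn't exist in the dictionary, add it with the length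
--                 min_lengths[value] = len(sublist)
--
--     return min_lengths
-- ===== SOURCE B (Python) =====
-- def find_smallest_sublist_length(lst):
--     # Collect all sublist lengths per value in one pass, then reduce with min in a second pass.
--     lengths_by_value = {}
--     for sublist in lst:
--         parts = sublist.strip("[]").split(',')
--         n = len(parts)
--         for value in parts:
--             value = value.strip('+').strip('-')
--             lengths_by_value.setdefault(value, []).append(n)
--     return {value: min(lengths) for value, lengths in lengths_by_value.items()}
-- ===== Notes on version B (the rewrite author's own statement) =====
-- stated objective: alternative
-- what changed: Instead of maintaining a running minimum per key inside the loop, B groups all sublist lengths per value into lists in one pass and reduces each group with min in a separate comprehension pass.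
import Mathlib
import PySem

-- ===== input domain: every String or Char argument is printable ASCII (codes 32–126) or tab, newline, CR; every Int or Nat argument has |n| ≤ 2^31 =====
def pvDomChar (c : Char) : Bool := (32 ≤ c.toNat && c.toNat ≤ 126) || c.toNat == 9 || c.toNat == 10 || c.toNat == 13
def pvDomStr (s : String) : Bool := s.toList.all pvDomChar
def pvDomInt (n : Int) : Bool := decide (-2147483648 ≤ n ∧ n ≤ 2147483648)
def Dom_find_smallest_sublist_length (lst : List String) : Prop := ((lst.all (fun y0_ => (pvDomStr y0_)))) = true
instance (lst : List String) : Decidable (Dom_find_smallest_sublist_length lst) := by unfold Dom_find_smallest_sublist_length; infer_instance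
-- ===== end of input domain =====

-- B groups all sublist lengths per value into lists in one pass and reduces each group
-- with min in a second pass, instead of A's running minimum updated inside the loop.

-- shared parsing helpers (both Pythons contain these exact expressions)
-- sublist.strip("[]").split(',')  (split? is some: the separator "," is nonempty)
def pvSplit (s : String) : List String :=
  (PySem.Str.split? (PySem.Str.stripChars s "[]") ",").getD []

-- value.strip('+').strip('-')
def pvStripVal (v : String) : String :=
  PySem.Str.stripChars (PySem.Str.stripChars v "+") "-"

-- ===== PORT A =====
def find_smallest_sublist_length (lst : List String) : List (String × Int) :=
  (lst.foldl (fun d s =>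
      let sub := pvSplit s
      sub.foldl (fun d v =>
        let value := pvStripVal v
        match d.get? value with
        | some m => d.insert value (min m (sub.length : Int))
        | none => d.insert value (sub.length : Int)) d)
    PySem.Dict.empty).items

-- ===== PORT B =====
-- Python's min over a nonempty list of ints (every collected list is nonempty; [] case unreachable)
def pvMinList : List Int → Int
  | [] => 0
  | h :: t => t.foldl min h

def find_smallest_sublist_length_alt (lst : List String) : List (String × Int) :=
  let collected := lst.foldl (fun d s =>
      let parts := pvSplit s
      let n : Int := parts.length
      parts.foldl (fun d v => d.modify (pvStripVal v) [] (· ++ [n])) d)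
    PySem.Dict.empty
  collected.items.map (fun p => (p.1, pvMinList p.2))

-- ===== PRECONDITION & SPEC =====
def Spec_find_smallest_sublist_length (lst : List String) (out : List (String × Int)) : Prop := out = find_smallest_sublist_length_alt lst
instance (lst : List String) (out : List (String × Int)) : Decidable (Spec_find_smallest_sublist_length lst out) := by unfold Spec_find_smallest_sublist_length; infer_instance

-- ===== CLAIM (what is proved, stated in full; the proofs are below) =====
def Claim_equal_find_smallest_sublist_length : Prop := ∀ (lst : List String), Dom_find_smallest_sublist_length lst → Spec_find_smallest_sublist_length lst (find_smallest_sublist_length lst)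

-- ===== LEMMAS AND PROOFS =====

-- mapping B's dict of length-lists to A's dict of minima
def pvMapD (d : PySem.Dict String (List Int)) : PySem.Dict String Int :=
  PySem.Dict.mk (d.items.map (fun p => (p.1, pvMinList p.2)))

-- invariant: every collected list is nonempty
def pvNE (d : PySem.Dict String (List Int)) : Prop := ∀ p ∈ d.items, p.2 ≠ []

lemma pvMinList_append (ls : List Int) (h : ls ≠ []) (n : Int) :
    pvMinList (ls ++ [n]) = min (pvMinList ls) n := by
  cases ls with
  | nil => exact absurd rfl h
  | cons a t => simp [pvMinList, List.foldl_append]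

lemma pvMapD_contains (d : PySem.Dict String (List Int)) (k : String) :
    (pvMapD d).contains k = d.contains k := by
  simp [pvMapD, PySem.Dict.contains, List.any_map, Function.comp_def]

lemma pvMapD_get? (d : PySem.Dict String (List Int)) (k : String) :
    (pvMapD d).get? k = (d.get? k).map pvMinList := by
  simp [pvMapD, PySem.Dict.get?, List.find?_map, Function.comp_def, Option.map_map]

lemma pvMapD_insert (d : PySem.Dict String (List Int)) (k : String) (w : List Int) :
    pvMapD (d.insert k w) = (pvMapD d).insert k (pvMinList w) := by
  simp only [PySem.Dict.insert, pvMapD_contains]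
  split
  · simp only [pvMapD, List.map_map]
    congr 1
    apply List.map_congr_left
    intro p _
    by_cases hp : p.1 == k <;> simp [Function.comp, hp]
  · simp [pvMapD]

lemma pvNE_modify (d : PySem.Dict String (List Int)) (k : String) (n : Int)
    (h : pvNE d) : pvNE (d.modify k [] (· ++ [n])) := by
  intro p hp
  simp only [PySem.Dict.modify] at hp
  rcases (PySem.Dict.mem_items_insert _ _ _ _).1 hp with h1 | h2
  · subst h1; simp
  · exact h p h2.1

-- one step of the two loops commutes with pvMapD
lemma pvStep_comm (d : PySem.Dict String (List Int)) (hne : pvNE d) (k : String) (n : Int) :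
    (match (pvMapD d).get? k with
      | some m => (pvMapD d).insert k (min m n)
      | none => (pvMapD d).insert k n)
      = pvMapD (d.modify k [] (· ++ [n])) := by
  rw [pvMapD_get?, PySem.Dict.modify, pvMapD_insert]
  cases hg : d.get? k with
  | none =>
      simp [PySem.Dict.getD, hg, pvMinList]
  | some ls =>
      have hls : ls ≠ [] := by
        rcases Option.map_eq_some_iff.1 hg with ⟨q, hq, hq2⟩
        have hmem := List.mem_of_find?_eq_some hq
        subst hq2
        exact hne q hmem
      simp [PySem.Dict.getD, hg, pvMinList_append ls hls n]

-- the inner loops over one parsed sublist commute with pvMapD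
lemma pvInner_comm (vs : List String) (n : Int) (d : PySem.Dict String (List Int)) (hne : pvNE d) :
    (vs.foldl (fun d v =>
        match d.get? (pvStripVal v) with
        | some m => d.insert (pvStripVal v) (min m n)
        | none => d.insert (pvStripVal v) n) (pvMapD d)
      = pvMapD (vs.foldl (fun d v => d.modify (pvStripVal v) [] (· ++ [n])) d))
    ∧ pvNE (vs.foldl (fun d v => d.modify (pvStripVal v) [] (· ++ [n])) d) := by
  induction vs generalizing d with
  | nil => exact ⟨rfl, hne⟩
  | cons v t ih =>
      have h1 := pvStep_comm d hne (pvStripVal v) n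
      have h2 := pvNE_modify d (pvStripVal v) n hne
      have := ih (d.modify (pvStripVal v) [] (· ++ [n])) h2
      simp only [List.foldl_cons, h1]
      exact this

-- the outer loops commute with pvMapD
lemma pvOuter_comm (lst : List String) (d : PySem.Dict String (List Int)) (hne : pvNE d) :
    (lst.foldl (fun d s =>
        let sub := pvSplit s
        sub.foldl (fun d v =>
          let value := pvStripVal v
          match d.get? value with
          | some m => d.insert value (min m (sub.length : Int))
          | none => d.insert value (sub.length : Int)) d) (pvMapD d)
      = pvMapD (lst.foldl (fun d s =>
          let parts := pvSplit s
          let n : Int := parts.length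
          parts.foldl (fun d v => d.modify (pvStripVal v) [] (· ++ [n])) d) d))
    ∧ pvNE (lst.foldl (fun d s =>
          let parts := pvSplit s
          let n : Int := parts.length
          parts.foldl (fun d v => d.modify (pvStripVal v) [] (· ++ [n])) d) d) := by
  induction lst generalizing d with
  | nil => exact ⟨rfl, hne⟩
  | cons s t ih =>
      have h := pvInner_comm (pvSplit s) ((pvSplit s).length : Int) d hne
      simp only [List.foldl_cons, h.1]
      exact ih _ h.2

-- ===== VERDICT (by name: the statement is the Claim_ definition above) =====
theorem find_smallest_sublist_length_spec : Claim_equal_find_smallest_sublist_length := by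
  intro lst _
  unfold Spec_find_smallest_sublist_length find_smallest_sublist_length find_smallest_sublist_length_alt
  have hne0 : pvNE PySem.Dict.empty := by intro p hp; simp [PySem.Dict.empty] at hp
  have h := pvOuter_comm lst PySem.Dict.empty hne0
  have hstart : pvMapD PySem.Dict.empty = PySem.Dict.empty := rfl
  rw [hstart] at h
  rw [h.1]
  rfl
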